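-- pv_equiv track=rewrite | github.com/Dr3ynor/DIPLOMA | code/tsp_solver/algorithms/lkh.py | _normalize_lkh_route
-- ===== SOURCE A (Python) =====
-- def _normalize_lkh_route(nodes_one_based: list[int], n: int) -> list[int]:
--     if not nodes_one_based:
--         return list(range(n))
--     tour = [int(x) for x in nodes_one_based if 1 <= int(x) <= n]
--     if len(tour) > n and tour[0] == tour[-1]:
--         tour = tour[:-1]
--     if len(tour) != n or sorted(tour) != list(range(1, n + 1)):
--         raise RuntimeError(
--             f"Neočekávaný tvar trasy z LKH: délka={len(tour)}, n={n}, ukázka={tour[:20]}"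
--         )
--     zero_at = tour.index(1)
--     rotated = tour[zero_at:] + tour[:zero_at]
--     return [x - 1 for x in rotated]
-- ===== SOURCE B (Python) =====
-- def _normalize_lkh_route(nodes_one_based: list[int], n: int) -> list[int]:
--     if not nodes_one_based:
--         return list(range(n))
--     tour = [int(x) for x in nodes_one_based if 1 <= int(x) <= n]
--     if len(tour) > n and tour[0] == tour[-1]:
--         tour = tour[:-1]
--     # O(n) counting validation instead of sort-and-compare
--     ok = len(tour) == n
--     pos1 = -1
--     if ok:
--         seen = [False] * n
--         for i, v in enumerate(tour):
--             if seen[v - 1]: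
--                 ok = False
--                 break
--             seen[v - 1] = True
--             if v == 1:
--                 pos1 = i
--     if not ok:
--         raise RuntimeError(
--             f"Neočekávaný tvar trasy z LKH: délka={len(tour)}, n={n}, ukázka={tour[:20]}"
--         )
--     if pos1 < 0:
--         raise ValueError("1 is not in tour")
--     # rotate via modular indexing instead of slice concatenation
--     return [tour[(pos1 + j) % n] - 1 for j in range(n)]
-- ===== Notes on version B (the rewrite author's own statement) =====
-- stated objective: faster
-- what changed: Replaces the O(n log n) sorted(tour)==range comparison with a single O(n) counting pass over a boolean 'seen' array that simultaneously records the position of node 1, and builds the rotated zero-based output by modular indexing instead of slice concatenation.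
import Mathlib
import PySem

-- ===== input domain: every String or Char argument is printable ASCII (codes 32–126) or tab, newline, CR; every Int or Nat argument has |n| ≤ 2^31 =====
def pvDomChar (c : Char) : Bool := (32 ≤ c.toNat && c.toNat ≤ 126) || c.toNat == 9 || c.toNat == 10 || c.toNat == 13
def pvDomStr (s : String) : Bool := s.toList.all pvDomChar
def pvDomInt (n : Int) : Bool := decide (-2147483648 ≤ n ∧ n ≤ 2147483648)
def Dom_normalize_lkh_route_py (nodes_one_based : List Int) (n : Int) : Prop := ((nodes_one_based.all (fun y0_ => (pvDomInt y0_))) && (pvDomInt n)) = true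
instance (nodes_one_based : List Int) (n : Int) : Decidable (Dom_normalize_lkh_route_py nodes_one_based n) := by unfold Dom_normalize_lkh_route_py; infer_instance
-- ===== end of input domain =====

-- B validates the tour with one O(n) counting pass (boolean 'seen' array, recording where node 1 sits)
-- instead of A's sorted(tour)==range comparison, and rotates by modular indexing instead of slicing.

-- ===== PORT A =====
-- A raises RuntimeError / ValueError on inputs outside Pre_; the port returns [] on those branches
-- (never reached inside Pre_).
def normalize_lkh_route_py (nodes_one_based : List Int) (n : Int) : List Int :=
  if nodes_one_based = [] then
    PySem.List.pyRange 0 n 1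
  else
    let tour0 := nodes_one_based.filter (fun x => decide (1 ≤ x) && decide (x ≤ n))
    let tour := if (tour0.length : Int) > n
                   && (PySem.List.pyGetD tour0 0 0 == PySem.List.pyGetD tour0 (-1) 0)
                then PySem.List.slice tour0 none (some (-1)) else tour0
    if ¬((tour.length : Int) = n ∧
         PySem.List.sorted tour (fun x => x) false = PySem.List.pyRange 1 (n + 1) 1) then
      []  -- raise RuntimeError
    else
      match PySem.List.index? tour 1 with
      | none => []  -- tour.index(1) raises ValueError
      | some zero_at =>
          (PySem.List.slice tour (some (zero_at : Int)) none
            ++ PySem.List.slice tour none (some (zero_at : Int))).map (fun x => x - 1)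

-- ===== PORT B =====
-- the 'for i, v in enumerate(tour)' counting loop of Source B, with early break on a repeated value
def pvScanB (n : Int) : List Int → Nat → List Bool → Int → Bool × Int
  | [], _, _, pos1 => (true, pos1)
  | v :: rest, i, seen, pos1 =>
      if PySem.List.pyGetD seen (v - 1) false then (false, pos1)
      else pvScanB n rest (i + 1) (PySem.List.pySetD seen (v - 1) true)
             (if v = 1 then (i : Int) else pos1)

def normalize_lkh_route_py_alt (nodes_one_based : List Int) (n : Int) : List Int :=
  if nodes_one_based = [] then
    PySem.List.pyRange 0 n 1
  else
    let tour0 := nodes_one_based.filter (fun x => decide (1 ≤ x) && decide (x ≤ n))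
    let tour := if (tour0.length : Int) > n
                   && (PySem.List.pyGetD tour0 0 0 == PySem.List.pyGetD tour0 (-1) 0)
                then PySem.List.slice tour0 none (some (-1)) else tour0
    let st := if (tour.length : Int) = n
              then pvScanB n tour 0 (PySem.List.pyRepeat [false] n) (-1)
              else (false, -1)
    if ¬ st.1 then []  -- raise RuntimeError
    else if st.2 < 0 then []  -- raise ValueError
    else (PySem.List.pyRange 0 n 1).map
           (fun j => PySem.List.pyGetD tour (PySem.Int.mod (st.2 + j) n) 0 - 1)

-- ===== PRECONDITION & SPEC =====
-- Pre_ excludes exactly the inputs on which A raises (RuntimeError when the filtered/trimmed tour is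
-- not a permutation of 1..n, ValueError when n = 0 with a nonempty input, IndexError when n < 0 with
-- a nonempty input); B raises there too.
def Pre_normalize_lkh_route_py (nodes_one_based : List Int) (n : Int) : Prop :=
  nodes_one_based = [] ∨
    (1 ≤ n ∧
      (let t := nodes_one_based.filter (fun x => decide (1 ≤ x) && decide (x ≤ n))
       let tour := if (t.length : Int) > n ∧ t.head? = t.getLast? then t.dropLast else t
       (tour.length : Int) = n ∧ tour.Nodup ∧ ∀ v ∈ tour, 1 ≤ v ∧ v ≤ n))
instance (nodes_one_based : List Int) (n : Int) : Decidable (Pre_normalize_lkh_route_py nodes_one_based n) := by unfold Pre_normalize_lkh_route_py; infer_instance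

def pvWitness_normalize_lkh_route_py : List Int × Int := ([3, 1, 2, 3], 3)

def Spec_normalize_lkh_route_py (nodes_one_based : List Int) (n : Int) (out : List Int) : Prop := out = normalize_lkh_route_py_alt nodes_one_based n
instance (nodes_one_based : List Int) (n : Int) (out : List Int) : Decidable (Spec_normalize_lkh_route_py nodes_one_based n out) := by unfold Spec_normalize_lkh_route_py; infer_instance

-- ===== CLAIM (what is proved, stated in full; the proofs are below) =====
def Claim_equal_normalize_lkh_route_py : Prop := ∀ (nodes_one_based : List Int) (n : Int), Dom_normalize_lkh_route_py nodes_one_based n → Pre_normalize_lkh_route_py nodes_one_based n → Spec_normalize_lkh_route_py nodes_one_based n (normalize_lkh_route_py nodes_one_based n)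

-- ===== LEMMAS AND PROOFS =====

theorem scanB_ok (n : Int) (l : List Int) (i : Nat) (seen : List Bool) (pos1 : Int)
    (hlen : seen.length = n.toNat)
    (hb : ∀ v ∈ l, 1 ≤ v ∧ v ≤ n)
    (hnd : l.Nodup)
    (hseen : ∀ v ∈ l, PySem.List.pyGetD seen (v - 1) false = false) :
    pvScanB n l i seen pos1 =
      (true, (PySem.List.index? l 1).elim pos1 (fun k => (i : Int) + k)) := by
  induction l generalizing i seen pos1 with
  | nil => simp [pvScanB, PySem.List.index?]
  | cons v rest ih =>
    have hv := hb v (List.mem_cons_self ..)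
    have hg : PySem.List.pyGetD seen (v - 1) false = false := hseen v (List.mem_cons_self ..)
    have hvrest : v ∉ rest := (List.nodup_cons.mp hnd).1
    rw [pvScanB]
    simp only [hg, Bool.false_eq_true, if_false]
    rw [ih (i + 1) _ _ ?hl ?hb' ?hnd' ?hs']
    case hl => simpa [PySem.List.length_pySetD] using hlen
    case hb' => exact fun w hw => hb w (List.mem_cons_of_mem _ hw)
    case hnd' => exact hnd.of_cons
    case hs' =>
      intro w hw
      have hwb := hb w (List.mem_cons_of_mem _ hw)
      have hwv : w ≠ v := fun h => hvrest (h ▸ hw)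
      rw [PySem.List.pySetD_of_nonneg seen true (by omega),
          PySem.List.pyGetD_eq_getElem _ false (by omega) (by simp [hlen]; omega)]
      rw [List.getElem_set_ne (by omega)]
      rw [← PySem.List.pyGetD_eq_getElem _ false (by omega) (by simp [hlen]; omega)]
      exact hseen w (List.mem_cons_of_mem _ hw)
    by_cases hv1 : v = 1
    · subst hv1
      rw [PySem.List.index?_cons_self,
          (PySem.List.index?_eq_none_iff rest 1).mpr hvrest]
      simp
    · rw [PySem.List.index?_cons_of_ne rest hv1]
      cases hI : PySem.List.index? rest 1 with
      | none => simp [hv1]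
      | some k => simp [hv1]; ring

theorem rot_eq (tour : List Int) (z : Nat) (hz : z < tour.length) :
    (PySem.List.pyRange 0 (tour.length : Int) 1).map
        (fun j => PySem.List.pyGetD tour (PySem.Int.mod ((z : Int) + j) (tour.length : Int)) 0 - 1)
      = (tour.drop z ++ tour.take z).map (fun x => x - 1) := by
  apply List.ext_getElem
  · simp [PySem.List.length_pyRange_one]; omega
  · intro k h1 h2
    have hLk : k < tour.length := by
      simpa [PySem.List.length_pyRange_one] using h1
    simp only [List.getElem_map]
    rw [PySem.List.getElem_pyRange_one]
    have hcast : (z : Int) + ((0 : Int) + (k : Int)) = ((z + k : Nat) : Int) := by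
      push_cast; ring
    rw [hcast, PySem.Int.mod_natCast, PySem.List.pyGetD_natCast,
        List.getD_eq_getElem tour 0 (Nat.mod_lt _ (by omega))]
    rw [List.getElem_append]
    split_ifs with hcase
    · have hm : (z + k) % tour.length = z + k := Nat.mod_eq_of_lt (by simp at hcase; omega)
      simp only [List.getElem_drop, hm]
    · have hlt : k - (tour.drop z).length < (tour.take z).length := by
        simp at hcase ⊢; omega
      have hm : (z + k) % tour.length = z + k - tour.length := by
        rw [Nat.mod_eq_sub_mod (by simp at hcase; omega)]
        exact Nat.mod_eq_of_lt (by simp at hcase; omega)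
      have hidx : k - (List.drop z tour).length = z + k - tour.length := by
        simp at hcase ⊢; omega
      simp only [List.getElem_take, hm, hidx]

theorem tour_cond_eq (t : List Int) (n : Int) (hn : 1 ≤ n) :
    (if ((t.length : Int) > n
          && (PySem.List.pyGetD t 0 0 == PySem.List.pyGetD t (-1) 0))
     then PySem.List.slice t none (some (-1)) else t)
    = (if (t.length : Int) > n ∧ t.head? = t.getLast? then t.dropLast else t) := by
  rw [PySem.List.slice_to_neg_one]
  by_cases hl : (t.length : Int) > n
  · have hne : t ≠ [] := by
      intro h; subst h; simp at hl; omega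
    have h0 : PySem.List.pyGetD t 0 0 = t.head hne := by
      rw [PySem.List.pyGetD_zero, List.getD_eq_getElem t 0 (by
        have := List.length_pos_iff.mpr hne; omega)]
      exact (List.head_eq_getElem hne).symm
    have hm1 : PySem.List.pyGetD t (-1) 0 = t.getLast hne :=
      PySem.List.pyGetD_neg_one t 0 hne
    have hh : t.head? = some (t.head hne) := List.head?_eq_some_head hne
    have hg : t.getLast? = some (t.getLast hne) := List.getLast?_eq_some_getLast hne
    by_cases heq : t.head hne = t.getLast hne
    · simp [hl, h0, hm1, heq, hh, hg]
    · simp [hl, h0, hm1, heq, hh, hg]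
  · simp [hl]

theorem perm_range_of_nodup_bounds (tour : List Int) (n : Int)
    (hlen : (tour.length : Int) = n) (hnd : tour.Nodup)
    (hbnd : ∀ v ∈ tour, 1 ≤ v ∧ v ≤ n) :
    tour.Perm (PySem.List.pyRange 1 (n + 1) 1) := by
  have hsub : tour ⊆ PySem.List.pyRange 1 (n + 1) 1 := by
    intro v hv
    have := hbnd v hv
    exact PySem.List.mem_pyRange_one.mpr (by omega)
  have hsp : tour.Subperm (PySem.List.pyRange 1 (n + 1) 1) :=
    List.subperm_of_subset hnd hsub
  refine hsp.perm_of_length_le ?_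
  simp [PySem.List.length_pyRange_one]
  omega

theorem bodies_eq (tour : List Int) (n : Int) (hn : 1 ≤ n)
    (hperm : tour.Perm (PySem.List.pyRange 1 (n + 1) 1)) :
    (if ¬((tour.length : Int) = n ∧
          PySem.List.sorted tour (fun x => x) false = PySem.List.pyRange 1 (n + 1) 1) then
       ([] : List Int)
     else
       match PySem.List.index? tour 1 with
       | none => []
       | some zero_at =>
           (PySem.List.slice tour (some (zero_at : Int)) none
             ++ PySem.List.slice tour none (some (zero_at : Int))).map (fun x => x - 1))
    = (let st := if (tour.length : Int) = n
                 then pvScanB n tour 0 (PySem.List.pyRepeat [false] n) (-1)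
                 else (false, -1)
       if ¬ st.1 then [] else if st.2 < 0 then []
       else (PySem.List.pyRange 0 n 1).map
              (fun j => PySem.List.pyGetD tour (PySem.Int.mod (st.2 + j) n) 0 - 1)) := by
  have hlen : tour.length = n.toNat := by
    have := hperm.length_eq
    simpa [PySem.List.length_pyRange_one] using this
  have hlenI : (tour.length : Int) = n := by rw [hlen]; omega
  have hmem : ∀ v ∈ tour, 1 ≤ v ∧ v ≤ n := by
    intro v hv
    have := (PySem.List.mem_pyRange_one).mp (hperm.mem_iff.mp hv)
    omega
  have hnd : tour.Nodup := hperm.nodup_iff.mpr (PySem.List.nodup_pyRange_one 1 (n + 1))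
  have h1 : (1 : Int) ∈ tour :=
    hperm.mem_iff.mpr ((PySem.List.mem_pyRange_one).mpr ⟨le_refl _, by omega⟩)
  obtain ⟨z, hz⟩ : ∃ z, PySem.List.index? tour 1 = some z := by
    cases hI : PySem.List.index? tour 1 with
    | none => exact absurd ((PySem.List.index?_eq_none_iff tour 1).mp hI) (by simpa using h1)
    | some z => exact ⟨z, rfl⟩
  obtain ⟨hzlt, hz1, hzfirst⟩ := PySem.List.getElem_of_index?_eq_some hz
  have hsorted : PySem.List.sorted tour (fun x => x) false = PySem.List.pyRange 1 (n + 1) 1 :=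
    PySem.List.sorted_eq_of_perm_of_pairwise_lt tour (PySem.List.pyRange 1 (n + 1) 1) (fun x => x) hperm.symm (PySem.List.pairwise_lt_pyRange_one 1 (n + 1))
  have hseen : ∀ v ∈ tour, PySem.List.pyGetD (PySem.List.pyRepeat [false] n) (v - 1) false = false := by
    intro v hv
    have hvb := hmem v hv
    rw [PySem.List.pyRepeat_singleton,
        PySem.List.pyGetD_eq_getElem _ false (by omega) (by simp; omega)]
    simp
  have hscan := scanB_ok n tour 0 (PySem.List.pyRepeat [false] n) (-1)
    (by simp [PySem.List.pyRepeat_singleton]) hmem hnd hseen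
  rw [hz] at hscan ⊢
  simp only [hlenI, hsorted, and_self, not_true_eq_false, if_false, ite_true,
    hscan, Option.elim_some]
  rw [PySem.List.slice_from_natCast, PySem.List.slice_to_natCast]
  have h0z : ((0 : Nat) : Int) + (z : Int) = (z : Int) := by simp
  rw [h0z, if_neg (by omega)]
  rw [← hlenI]
  exact (rot_eq tour z hzlt).symm

-- ===== VERDICT (by name: the statement is the Claim_ definition above) =====
theorem normalize_lkh_route_py_spec : Claim_equal_normalize_lkh_route_py := by
  intro nodes n hdom hpre
  unfold Spec_normalize_lkh_route_py normalize_lkh_route_py normalize_lkh_route_py_alt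
  by_cases hnil : nodes = []
  · simp [hnil]
  · rcases hpre with h | ⟨hn, hperm⟩
    · exact absurd h hnil
    simp only [hnil, if_false]
    simp only [] at hperm
    rw [tour_cond_eq _ n hn]
    obtain ⟨hlen, hnd, hbnd⟩ := hperm
    exact bodies_eq _ n hn (perm_range_of_nodup_bounds _ n hlen hnd hbnd)
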